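-- pv_equiv track=rewrite | github.com/tarunV45/Comp-536---Final-Project | tools/simulate_mixed_workloads.py | simulate_workload_aware_lru
-- ===== SOURCE A (Python) =====
-- from collections import OrderedDict, defaultdict
--
-- def simulate_workload_aware_lru(events, capacity, cacheable_workloads):
--     """
--     Workload-aware policy:
--       - Only cache blocks from 'cacheable_workloads' (chat_multi, qa).
--       - For other workloads (chat_single, summarization), always treat as miss
--         and do not insert into cache.
--     """
--     cache = OrderedDict()
--     hits = misses = 0
--     hits_by_w = defaultdict(int)
--     misses_by_w = defaultdict(int)
--
--     for _, key, w in events: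
--         if w not in cacheable_workloads:
--             # never cache this workload; always miss
--             misses += 1
--             misses_by_w[w] += 1
--             continue
--
--         if key in cache:
--             hits += 1
--             hits_by_w[w] += 1
--             cache.move_to_end(key)
--         else:
--             misses += 1
--             misses_by_w[w] += 1
--             cache[key] = None
--             if len(cache) > capacity:
--                 cache.popitem(last=False)
--
--     return hits, misses, hits_by_w, misses_by_w
-- ===== SOURCE B (Python) =====
-- from collections import defaultdict
--
-- def simulate_workload_aware_lru(events, capacity, cacheable_workloads):
--     """Two-stage reformulation: stage 1 runs a plain-list LRU (recency order,
--     least-recent first) and logs one (workload, hit?) outcome per event;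
--     stage 2 derives all four counters from the outcome log."""
--     order = []
--     outcomes = []
--     for _, key, w in events:
--         if w in cacheable_workloads:
--             if key in order:
--                 order.remove(key)
--                 order.append(key)
--                 outcomes.append((w, True))
--             else:
--                 order.append(key)
--                 if len(order) > capacity:
--                     order.pop(0)
--                 outcomes.append((w, False))
--         else:
--             outcomes.append((w, False))
--
--     hits = 0
--     for _, h in outcomes:
--         if h:
--             hits += 1
--     misses = len(outcomes) - hits
--     hits_by_w = defaultdict(int)
--     for w, h in outcomes:
--         if h:
--             hits_by_w[w] += 1
--     misses_by_w = defaultdict(int)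
--     for w, h in outcomes:
--         if not h:
--             misses_by_w[w] += 1
--     return hits, misses, hits_by_w, misses_by_w
-- ===== Notes on version B (the rewrite author's own statement) =====
-- stated objective: alternative
-- what changed: Replaces the OrderedDict single-pass fold by a two-stage pipeline: a plain Python list kept in recency order (remove/append on hit, pop(0) on eviction) produces a per-event (workload, hit) outcome log, and all four counters are computed from that log in separate aggregation passes.
import Mathlib
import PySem

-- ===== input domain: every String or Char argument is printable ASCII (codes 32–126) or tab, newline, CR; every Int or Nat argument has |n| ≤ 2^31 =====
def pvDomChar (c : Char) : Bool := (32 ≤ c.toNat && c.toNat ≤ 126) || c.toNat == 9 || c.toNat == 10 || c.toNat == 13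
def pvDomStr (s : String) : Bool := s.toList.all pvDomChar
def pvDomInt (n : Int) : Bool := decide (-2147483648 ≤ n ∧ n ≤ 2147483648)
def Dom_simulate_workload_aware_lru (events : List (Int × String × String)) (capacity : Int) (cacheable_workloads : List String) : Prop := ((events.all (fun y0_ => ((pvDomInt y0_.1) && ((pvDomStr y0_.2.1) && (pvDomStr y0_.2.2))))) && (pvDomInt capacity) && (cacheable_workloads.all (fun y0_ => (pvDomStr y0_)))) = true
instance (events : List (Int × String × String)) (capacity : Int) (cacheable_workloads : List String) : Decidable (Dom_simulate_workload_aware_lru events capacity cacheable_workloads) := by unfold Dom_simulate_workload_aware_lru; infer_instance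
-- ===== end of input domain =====

-- B restructures A into two stages: a plain-list LRU (recency order, least-recent first)
-- that logs a (workload, hit?) outcome per event, then separate aggregation passes over
-- that log for the four counters (alternative decomposition, no speed claim).


-- ===== PORT A =====
-- loop body of A: OrderedDict cache (value None ↦ Option Unit, none); move_to_end ported as
-- erase-then-insert of the (None) value; popitem(last=False) ported as erasing the first key.
def pvStepA (capacity : Int) (cacheable_workloads : List String)
    (st : PySem.Dict String (Option Unit) × Int × Int × PySem.Dict String Int × PySem.Dict String Int)
    (e : Int × String × String) :
    PySem.Dict String (Option Unit) × Int × Int × PySem.Dict String Int × PySem.Dict String Int :=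
  let cache := st.1
  let key := e.2.1
  let w := e.2.2
  if ¬ (w ∈ cacheable_workloads) then
    (cache, st.2.1, st.2.2.1 + 1, st.2.2.2.1, st.2.2.2.2.modify w 0 (· + 1))
  else if cache.contains key then
    ((cache.erase key).insert key none, st.2.1 + 1, st.2.2.1, st.2.2.2.1.modify w 0 (· + 1), st.2.2.2.2)
  else
    let cache1 := cache.insert key none
    let cache2 :=
      if (cache1.size : Int) > capacity then
        match cache1.items with
        | [] => cache1
        | p :: _ => cache1.erase p.1
      else cache1
    (cache2, st.2.1, st.2.2.1 + 1, st.2.2.2.1, st.2.2.2.2.modify w 0 (· + 1))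

def simulate_workload_aware_lru (events : List (Int × String × String)) (capacity : Int) (cacheable_workloads : List String) : Int × Int × (List (String × Int)) × (List (String × Int)) :=
  let fin := events.foldl (pvStepA capacity cacheable_workloads)
      (PySem.Dict.empty, 0, 0, PySem.Dict.empty, PySem.Dict.empty)
  (fin.2.1, fin.2.2.1, fin.2.2.2.1.items, fin.2.2.2.2.items)

-- ===== PORT B =====
-- stage 1 of B: recency list `order` (least-recent first) and the outcome log;
-- order.remove(key) ↦ PySem.List.remove?, order.pop(0) ↦ PySem.List.pop? _ 0.
def pvStage1 (capacity : Int) (cacheable_workloads : List String)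
    (st : List String × List (String × Bool)) (e : Int × String × String) :
    List String × List (String × Bool) :=
  let key := e.2.1
  let w := e.2.2
  if w ∈ cacheable_workloads then
    if key ∈ st.1 then
      match PySem.List.remove? st.1 key with
      | some order' => (order' ++ [key], st.2 ++ [(w, true)])
      | none => (st.1, st.2 ++ [(w, true)])
    else
      let order1 := st.1 ++ [key]
      let order2 :=
        if (order1.length : Int) > capacity then
          match PySem.List.pop? order1 0 with
          | some r => r.2
          | none => order1
        else order1
      (order2, st.2 ++ [(w, false)])
  else
    (st.1, st.2 ++ [(w, false)])

-- stage 2 of B: the aggregation passes over the outcome log.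
def pvCountHits (outcomes : List (String × Bool)) : Int :=
  outcomes.foldl (fun n o => if o.2 then n + 1 else n) 0

def pvByW (b : Bool) (outcomes : List (String × Bool)) : PySem.Dict String Int :=
  outcomes.foldl (fun d o => if o.2 == b then d.modify o.1 0 (· + 1) else d) PySem.Dict.empty

def simulate_workload_aware_lru_alt (events : List (Int × String × String)) (capacity : Int) (cacheable_workloads : List String) : Int × Int × (List (String × Int)) × (List (String × Int)) :=
  let outcomes := (events.foldl (pvStage1 capacity cacheable_workloads) ([], [])).2
  let hits := pvCountHits outcomes
  (hits, (outcomes.length : Int) - hits, (pvByW true outcomes).items, (pvByW false outcomes).items)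

-- ===== PRECONDITION & SPEC =====
def Spec_simulate_workload_aware_lru (events : List (Int × String × String)) (capacity : Int) (cacheable_workloads : List String) (out : Int × Int × (List (String × Int)) × (List (String × Int))) : Prop := out = simulate_workload_aware_lru_alt events capacity cacheable_workloads
instance (events : List (Int × String × String)) (capacity : Int) (cacheable_workloads : List String) (out : Int × Int × (List (String × Int)) × (List (String × Int))) : Decidable (Spec_simulate_workload_aware_lru events capacity cacheable_workloads out) := by unfold Spec_simulate_workload_aware_lru; infer_instance

-- ===== CLAIM =====
def Claim_equal_simulate_workload_aware_lru : Prop := ∀ (events : List (Int × String × String)) (capacity : Int) (cacheable_workloads : List String), Dom_simulate_workload_aware_lru events capacity cacheable_workloads → Spec_simulate_workload_aware_lru events capacity cacheable_workloads (simulate_workload_aware_lru events capacity cacheable_workloads)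

-- ===== LEMMAS AND PROOFS =====

-- Coupling: A's cache is exactly B's recency list (values all none), B's list is duplicate-free,
-- and A's four counters are the stage-2 aggregates of B's outcome log so far.
def pvRel (a : PySem.Dict String (Option Unit) × Int × Int × PySem.Dict String Int × PySem.Dict String Int)
    (b : List String × List (String × Bool)) : Prop :=
  a.1.items = b.1.map (fun k => (k, (none : Option Unit))) ∧ b.1.Nodup ∧
  a.2.1 = pvCountHits b.2 ∧
  a.2.2.1 = (b.2.length : Int) - pvCountHits b.2 ∧
  a.2.2.2.1 = pvByW true b.2 ∧
  a.2.2.2.2 = pvByW false b.2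

lemma pvCountHits_append (l : List (String × Bool)) (w : String) (h : Bool) :
    pvCountHits (l ++ [(w, h)]) = pvCountHits l + (if h then 1 else 0) := by
  simp [pvCountHits, List.foldl_append]
  split <;> simp

lemma pvByW_append (b : Bool) (l : List (String × Bool)) (w : String) (h : Bool) :
    pvByW b (l ++ [(w, h)]) =
      if h == b then (pvByW b l).modify w 0 (· + 1) else pvByW b l := by
  simp [pvByW, List.foldl_append]

lemma pvStep (capacity : Int) (cacheable_workloads : List String)
    (a : PySem.Dict String (Option Unit) × Int × Int × PySem.Dict String Int × PySem.Dict String Int)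
    (b : List String × List (String × Bool)) (e : Int × String × String) (h : pvRel a b) :
    pvRel (pvStepA capacity cacheable_workloads a e) (pvStage1 capacity cacheable_workloads b e) := by
  obtain ⟨hitems, hnd, hh, hm, hbt, hbf⟩ := h
  have hkeys : a.1.keys = b.1 := by
    simp [PySem.Dict.keys, hitems, Function.comp_def]
  by_cases hw : e.2.2 ∈ cacheable_workloads
  · by_cases hk : e.2.1 ∈ b.1
    · -- hit
      have hc : a.1.contains e.2.1 = true := by
        rw [PySem.Dict.contains_iff_mem_keys, hkeys]; exact hk
      simp only [pvStepA, pvStage1, hw, hk, hc, not_true, if_neg, if_pos, if_true,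
        not_false_iff, ite_true]
      rw [PySem.List.remove?_eq_some_erase b.1 e.2.1 hk]
      have herase : b.1.erase e.2.1 = b.1.filter (fun x => !(x == e.2.1)) := by
        rw [hnd.erase_eq_filter]; rfl
      refine ⟨?_, ?_, ?_, ?_, ?_, ?_⟩
      · -- items of (erase;insert) = (filtered ++ [key]).map
        have heitems : (a.1.erase e.2.1).items
            = (b.1.filter (fun x => !(x == e.2.1))).map (fun k => (k, (none : Option Unit))) := by
          simp [PySem.Dict.erase, hitems, List.filter_map, Function.comp_def]
        have hnc : (a.1.erase e.2.1).contains e.2.1 = false := by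
          rw [← Bool.not_eq_true, PySem.Dict.contains_iff_mem_keys]
          simp [PySem.Dict.keys, heitems, List.mem_filter]
        rw [PySem.Dict.items_insert_of_not_contains _ _ hnc, heitems, herase]
        simp
      · rw [herase]
        refine List.Nodup.append (hnd.filter _) (List.nodup_singleton _) ?_
        intro x hx hy
        have : x = e.2.1 := by simpa using hy
        subst this
        simpa using (List.mem_filter.1 hx).2
      · rw [pvCountHits_append, hh]; simp
      · rw [pvCountHits_append, hm]; push_cast; ring_nf; simp; ring
      · rw [pvByW_append, hbt]; simp
      · rw [pvByW_append, hbf]; simp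
    · -- miss, cacheable
      have hc : a.1.contains e.2.1 = false := by
        rw [← Bool.not_eq_true, PySem.Dict.contains_iff_mem_keys, hkeys]; exact hk
      simp only [pvStepA, pvStage1, hw, hk, hc, not_true, not_false_iff, if_neg, if_pos,
        Bool.false_eq_true, if_false, ite_true, ite_false]
      have hitems1 : (a.1.insert e.2.1 (none : Option Unit)).items
          = (b.1 ++ [e.2.1]).map (fun k => (k, (none : Option Unit))) := by
        rw [PySem.Dict.items_insert_of_not_contains _ _ hc, hitems]; simp
      have hnd1 : (b.1 ++ [e.2.1]).Nodup := by
        refine List.Nodup.append hnd (List.nodup_singleton _) ?_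
        intro x hx hy
        have : x = e.2.1 := by simpa using hy
        subst this; exact hk hx
      have hsz : ((a.1.insert e.2.1 (none : Option Unit)).size : Int)
          = ((b.1 ++ [e.2.1]).length : Int) := by
        simp [PySem.Dict.size, hitems1]
      refine ⟨?_, ?_, ?_, ?_, ?_, ?_⟩
      · -- cache part
        rw [hsz]
        by_cases hcap : ((b.1 ++ [e.2.1]).length : Int) > capacity
        · rw [if_pos hcap, if_pos hcap]
          rcases hbb : b.1 ++ [e.2.1] with _ | ⟨hd, tl⟩
          · simp at hbb
          · rw [hbb] at hitems1
            simp only [List.map_cons] at hitems1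
            rw [hitems1]
            have hhd : hd ∉ tl := by
              have := hnd1
              rw [hbb] at this
              exact (List.nodup_cons.1 this).1
            rw [PySem.List.pop?_zero_cons]
            simp only [PySem.Dict.erase, hitems1]
            simp only [List.filter_cons]
            simp only [beq_self_eq_true, Bool.not_true, Bool.false_eq_true, if_false]
            rw [List.filter_map]
            have : tl.filter (fun x => !(x == hd)) = tl := by
              apply List.filter_eq_self.2
              intro x hx
              simp
              exact fun hxe => hhd (hxe ▸ hx)
            simp [Function.comp_def, this]
        · rw [if_neg hcap, if_neg hcap]
          exact hitems1
      · by_cases hcap : ((b.1 ++ [e.2.1]).length : Int) > capacity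
        · rw [if_pos hcap]
          rcases hbb : b.1 ++ [e.2.1] with _ | ⟨hd, tl⟩
          · simp at hbb
          · simp only [PySem.List.pop?_zero_cons]
            have := hnd1; rw [hbb] at this
            exact (List.nodup_cons.1 this).2
        · rw [if_neg hcap]; exact hnd1
      · rw [pvCountHits_append, hh]; simp
      · rw [pvCountHits_append, hm]; push_cast; simp; ring
      · rw [pvByW_append, hbt]; simp
      · rw [pvByW_append, hbf]; simp
  · -- not cacheable
    simp only [pvStepA, pvStage1, hw, not_false_iff, if_pos, if_false, ite_false]
    refine ⟨hitems, hnd, ?_, ?_, ?_, ?_⟩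
    · rw [pvCountHits_append, hh]; simp
    · rw [pvCountHits_append, hm]; push_cast; simp; ring
    · rw [pvByW_append, hbt]; simp
    · rw [pvByW_append, hbf]; simp

lemma pvFold (capacity : Int) (cacheable_workloads : List String)
    (events : List (Int × String × String))
    (a : PySem.Dict String (Option Unit) × Int × Int × PySem.Dict String Int × PySem.Dict String Int)
    (b : List String × List (String × Bool)) (h : pvRel a b) :
    pvRel (events.foldl (pvStepA capacity cacheable_workloads) a)
      (events.foldl (pvStage1 capacity cacheable_workloads) b) := by
  induction events generalizing a b with
  | nil => exact h
  | cons e rest ih => exact ih _ _ (pvStep capacity cacheable_workloads a b e h)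

-- ===== VERDICT =====
theorem simulate_workload_aware_lru_spec : Claim_equal_simulate_workload_aware_lru := by
  intro events capacity cacheable_workloads _
  unfold Spec_simulate_workload_aware_lru
  unfold simulate_workload_aware_lru simulate_workload_aware_lru_alt
  have h0 : pvRel (PySem.Dict.empty, 0, 0, PySem.Dict.empty, PySem.Dict.empty) ([], []) := by
    refine ⟨?_, ?_, rfl, rfl, rfl, rfl⟩ <;> simp [PySem.Dict.empty]
  have hfin := pvFold capacity cacheable_workloads events _ _ h0
  obtain ⟨_, _, hh, hm, hbt, hbf⟩ := hfin
  simp only []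
  rw [hh, hm, hbt, hbf]
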